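-- pv_equiv track=rewrite | github.com/LucasGrandjean/portfolio | SiteCV/statutils.py | faireDonneesSexe
-- ===== SOURCE A (Python) =====
-- def faireDonneesSexe(fileCSV):
--     sommeHomme = 0
--     sommeFemme = 0
--     for row in fileCSV:
--         genre = row['Genre']
--         if genre == 'Homme':
--             sommeHomme += 1
--         elif genre == 'Femme':
--             sommeFemme += 1
--     return sommeHomme, sommeFemme
-- ===== SOURCE B (Python) =====
-- def faireDonneesSexe(fileCSV):
--     genres = [row['Genre'] for row in fileCSV]
--     return genres.count('Homme'), genres.count('Femme')
-- ===== Notes on version B (the rewrite author's own statement) =====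
-- stated objective: simpler
-- what changed: B replaces A's single loop with two conditionally-incremented scalar accumulators by staged passes: it first projects the 'Genre' column into a list (one pass over fileCSV, so one-shot iterators still work), then obtains each result with list.count, with no conditional branching at all.
import Mathlib
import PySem

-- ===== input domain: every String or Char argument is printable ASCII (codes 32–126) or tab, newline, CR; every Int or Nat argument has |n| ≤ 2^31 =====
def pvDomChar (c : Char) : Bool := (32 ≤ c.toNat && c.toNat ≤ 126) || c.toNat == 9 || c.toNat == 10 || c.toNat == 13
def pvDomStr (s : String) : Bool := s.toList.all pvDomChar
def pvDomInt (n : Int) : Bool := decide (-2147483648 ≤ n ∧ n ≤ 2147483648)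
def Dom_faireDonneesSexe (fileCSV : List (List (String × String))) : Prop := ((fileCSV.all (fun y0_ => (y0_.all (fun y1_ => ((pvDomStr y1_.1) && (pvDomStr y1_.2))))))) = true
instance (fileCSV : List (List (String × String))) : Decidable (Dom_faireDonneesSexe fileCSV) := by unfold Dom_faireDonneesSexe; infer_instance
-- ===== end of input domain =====

-- B replaces A's single branching loop by staged passes: project the 'Genre' column into
-- a list, then read each result off with list.count (objective: simpler).

-- ===== PORT A =====
-- row['Genre'] : dict lookup, first match in the association list; none = KeyError (excluded by Pre_)
def pvGenre (row : List (String × String)) : Option String :=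
  (PySem.Dict.mk row).get? "Genre"

def faireDonneesSexe (fileCSV : List (List (String × String))) : Int × Int :=
  fileCSV.foldl (fun acc row =>
    match pvGenre row with
    | some genre =>
        if genre == "Homme" then (acc.1 + 1, acc.2)
        else if genre == "Femme" then (acc.1, acc.2 + 1)
        else acc
    | none => acc)  -- Python raises KeyError here; such inputs are outside Pre_
    (0, 0)

-- ===== PORT B =====
def faireDonneesSexe_alt (fileCSV : List (List (String × String))) : Int × Int :=
  -- genres = [row['Genre'] for row in fileCSV]  (KeyError rows are outside Pre_, where the
  -- comprehension raises; filterMap is exact on Pre_)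
  let genres := fileCSV.filterMap pvGenre
  (PySem.List.count genres "Homme", PySem.List.count genres "Femme")

-- ===== PRECONDITION & SPEC =====
-- Pre_ excludes exactly the inputs where row['Genre'] raises KeyError (a row without a 'Genre' key).
def Pre_faireDonneesSexe (fileCSV : List (List (String × String))) : Prop :=
  (fileCSV.all (fun row => row.any (fun p => p.1 == "Genre"))) = true
instance (fileCSV : List (List (String × String))) : Decidable (Pre_faireDonneesSexe fileCSV) := by
  unfold Pre_faireDonneesSexe; infer_instance

def pvWitness_faireDonneesSexe : (List (List (String × String))) :=
  [[("Genre", "Homme")], [("Genre", "Femme"), ("Age", "30")], [("Genre", "Autre")]]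

def Spec_faireDonneesSexe (fileCSV : List (List (String × String))) (out : Int × Int) : Prop := out = faireDonneesSexe_alt fileCSV
instance (fileCSV : List (List (String × String))) (out : Int × Int) : Decidable (Spec_faireDonneesSexe fileCSV out) := by unfold Spec_faireDonneesSexe; infer_instance

-- ===== CLAIM (what is proved, stated in full; the proofs are below) =====
def Claim_equal_faireDonneesSexe : Prop := ∀ (fileCSV : List (List (String × String))), Dom_faireDonneesSexe fileCSV → Pre_faireDonneesSexe fileCSV → Spec_faireDonneesSexe fileCSV (faireDonneesSexe fileCSV)

-- ===== LEMMAS AND PROOFS =====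

-- A's scalar loop over l, started at (a, b), adds the counts of "Homme" and "Femme"
-- in the projected genre list.
theorem pv_invariant (l : List (List (String × String))) (a b : Int) :
    l.foldl (fun acc row =>
        match pvGenre row with
        | some genre =>
            if genre == "Homme" then (acc.1 + 1, acc.2)
            else if genre == "Femme" then (acc.1, acc.2 + 1)
            else acc
        | none => acc) (a, b)
    = (a + ((l.filterMap pvGenre).count "Homme" : Int),
       b + ((l.filterMap pvGenre).count "Femme" : Int)) := by
  induction l generalizing a b with
  | nil => simp
  | cons row rest ih =>
    simp only [List.foldl_cons, List.filterMap_cons]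
    cases hg : pvGenre row with
    | none => simp only [hg]; exact ih a b
    | some g =>
      simp only [hg]
      by_cases h1 : g = "Homme"
      · subst h1
        simp only [beq_self_eq_true, if_true, ih, List.count_cons]
        simp only [Prod.mk.injEq]
        push_cast
        constructor
        · ring
        · norm_num
      · by_cases h2 : g = "Femme"
        · subst h2
          simp only [ih, List.count_cons]
          simp only [show (("Femme" : String) == "Homme") = false by decide, if_false,
            beq_self_eq_true, if_true]
          simp only [Prod.mk.injEq]
          push_cast
          constructor
          · norm_num
          · ring
        · have b1 : (g == "Homme") = false := by simp [h1]
          have b2 : (g == "Femme") = false := by simp [h2]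
          simp only [b1, b2, if_false, ih, List.count_cons]
          simp [h1, h2]

-- ===== VERDICT (by name: the statement is the Claim_ definition above) =====
theorem faireDonneesSexe_spec : Claim_equal_faireDonneesSexe := by
  intro fileCSV _ _
  unfold Spec_faireDonneesSexe faireDonneesSexe faireDonneesSexe_alt
  show _ = ((PySem.List.count _ _ : Int), (PySem.List.count _ _ : Int))
  rw [pv_invariant]
  simp [PySem.List.count_eq]
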